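-- pv_equiv track=rewrite | github.com/CaioChizzolini/PanoramaProject | funcoes.py | valida
-- ===== SOURCE A (Python) =====
-- def valida(alt, larg, x, y):
--     for i in x:
--         if i < 0 or i >= alt:
--             return False
--     for j in y:
--         if j < 0 or j >= larg:
--             return False
--     return True
-- ===== SOURCE B (Python) =====
-- def valida(alt, larg, x, y):
--     ok_x = (not x) or (min(x) >= 0 and max(x) < alt)
--     ok_y = (not y) or (min(y) >= 0 and max(y) < larg)
--     return ok_x and ok_y
-- ===== Notes on version B (the rewrite author's own statement) =====
-- stated objective: simpler
-- what changed: Replaces the two elementwise early-return loops with aggregate min/max extremum checks (empty lists pass vacuously), combined with boolean and.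
import Mathlib
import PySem

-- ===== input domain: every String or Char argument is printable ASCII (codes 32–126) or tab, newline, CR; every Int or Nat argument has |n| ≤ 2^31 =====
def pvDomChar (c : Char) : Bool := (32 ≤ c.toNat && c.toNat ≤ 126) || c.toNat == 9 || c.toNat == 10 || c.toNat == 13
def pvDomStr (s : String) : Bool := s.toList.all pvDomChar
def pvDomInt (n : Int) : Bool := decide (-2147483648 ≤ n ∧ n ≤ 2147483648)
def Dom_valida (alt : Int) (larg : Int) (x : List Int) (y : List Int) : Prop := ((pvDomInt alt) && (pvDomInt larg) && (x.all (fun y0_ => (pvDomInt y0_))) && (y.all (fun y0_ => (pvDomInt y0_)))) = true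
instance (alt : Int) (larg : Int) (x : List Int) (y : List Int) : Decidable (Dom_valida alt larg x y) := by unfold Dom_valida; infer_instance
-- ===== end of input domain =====

-- B replaces the elementwise early-return loops with aggregate min/max extremum checks (objective: simpler).
-- ===== PORT A =====
-- the 'for i in x: if i < 0 or i >= bound: return False' loop, early return as recursion
def validaLoop (bound : Int) : List Int → Bool
  | [] => true
  | i :: t => if i < 0 || bound ≤ i then false else validaLoop bound t

def valida (alt : Int) (larg : Int) (x : List Int) (y : List Int) : Bool :=
  if validaLoop alt x then validaLoop larg y else false

-- ===== PORT B =====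
-- '(not l) or (min(l) >= 0 and max(l) < bound)'
def checkRange (bound : Int) (l : List Int) : Bool :=
  l.isEmpty ||
  (decide (0 ≤ (PySem.List.min? l (fun v => v)).getD 0) &&
   decide ((PySem.List.max? l (fun v => v)).getD 0 < bound))

def valida_alt (alt : Int) (larg : Int) (x : List Int) (y : List Int) : Bool :=
  checkRange alt x && checkRange larg y

-- ===== PRECONDITION & SPEC =====
def Spec_valida (alt : Int) (larg : Int) (x : List Int) (y : List Int) (out : Bool) : Prop := out = valida_alt alt larg x y
instance (alt : Int) (larg : Int) (x : List Int) (y : List Int) (out : Bool) : Decidable (Spec_valida alt larg x y out) := by unfold Spec_valida; infer_instance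

-- ===== CLAIM (what is proved, stated in full; the proofs are below) =====
def Claim_equal_valida : Prop := ∀ (alt : Int) (larg : Int) (x : List Int) (y : List Int), Dom_valida alt larg x y → Spec_valida alt larg x y (valida alt larg x y)

-- ===== LEMMAS AND PROOFS =====

lemma validaLoop_iff (b : Int) (l : List Int) :
    validaLoop b l = true ↔ ∀ i ∈ l, 0 ≤ i ∧ i < b := by
  induction l with
  | nil => simp [validaLoop]
  | cons h t ih =>
    simp only [validaLoop, List.mem_cons]
    split_ifs with hc
    · simp only [false_iff]
      intro hall
      rcases hall h (Or.inl rfl) with ⟨h1, h2⟩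
      simp only [Bool.or_eq_true, decide_eq_true_eq] at hc
      omega
    · simp only [Bool.or_eq_true, decide_eq_true_eq, not_or, not_lt, not_le] at hc
      rw [ih]
      constructor
      · rintro ha i (rfl | hi)
        · exact ⟨hc.1, hc.2⟩
        · exact ha i hi
      · intro ha i hi; exact ha i (Or.inr hi)

lemma checkRange_iff (b : Int) (l : List Int) :
    checkRange b l = true ↔ ∀ i ∈ l, 0 ≤ i ∧ i < b := by
  cases l with
  | nil => simp [checkRange]
  | cons h t =>
    rcases hm : PySem.List.min? (h :: t) (fun v => v) with _ | m
    · exact absurd ((PySem.List.min?_eq_none_iff _ _).mp hm) (by simp)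
    rcases hM : PySem.List.max? (h :: t) (fun v => v) with _ | M
    · exact absurd ((PySem.List.max?_eq_none_iff _ _).mp hM) (by simp)
    have hmem := PySem.List.min?_mem hm
    have hMmem := PySem.List.max?_mem hM
    have hmin := PySem.List.min?_isMin hm
    have hmax := PySem.List.max?_isMax hM
    simp only [checkRange, hm, hM, Option.getD_some, List.isEmpty_cons,
      Bool.false_or, Bool.and_eq_true, decide_eq_true_eq]
    constructor
    · rintro ⟨h0, hb⟩ i hi
      exact ⟨le_trans h0 (hmin i hi), lt_of_le_of_lt (hmax i hi) hb⟩
    · intro ha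
      exact ⟨(ha m hmem).1, (ha M hMmem).2⟩

lemma loop_eq_check (b : Int) (l : List Int) : validaLoop b l = checkRange b l := by
  rw [Bool.eq_iff_iff, validaLoop_iff, checkRange_iff]

-- ===== VERDICT =====
theorem valida_spec : Claim_equal_valida := by
  intro alt larg x y _
  unfold Spec_valida valida valida_alt
  rw [loop_eq_check, loop_eq_check]
  cases checkRange alt x <;> simp
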